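-- pv_equiv track=rewrite | github.com/richdanis/aml | task2/full_waveform_statistics.py | decomposition_level
-- ===== SOURCE A (Python) =====
-- def decomposition_level(n_steps, level):
--
--     remainder = n_steps % 2**level
--
--     # Set starting multiplication factor
--     factor = 1
--
--     # Set updated waveform length variable
--     n_steps_new = n_steps
--
--     # Loop through multiplication factors until minimum factor found
--     while remainder != 0:
--
--         # Update multiplication factor
--         factor += 1
--
--         # Update waveform length
--         n_steps_new = factor * n_steps
--
--         # Calculate updated remainder
--         remainder = n_steps_new % 2**level
--
--     return n_steps_new
-- ===== SOURCE B (Python) =====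
-- def decomposition_level(n_steps, level):
--     # Smallest multiple of n_steps divisible by 2**level, via lcm: factor = 2**level // gcd(|n_steps|, 2**level).
--     block = 1 << level
--     a, b = abs(n_steps), block
--     while b:
--         a, b = b, a % b
--     return n_steps * (block // a)
-- ===== Notes on version B (the rewrite author's own statement) =====
-- stated objective: faster
-- what changed: replaces the trial loop over multiplication factors (up to 2**level iterations) with the closed form n_steps * (2**level // gcd(|n_steps|, 2**level)) using a Euclidean gcd; intended as faster (measured: A timed out at n=16 where B returned, so no clean ratio could be read)
-- outside the precondition, e.g. on decomposition_level(3, -1): A returns 3, B raises ValueError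
import Mathlib
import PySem

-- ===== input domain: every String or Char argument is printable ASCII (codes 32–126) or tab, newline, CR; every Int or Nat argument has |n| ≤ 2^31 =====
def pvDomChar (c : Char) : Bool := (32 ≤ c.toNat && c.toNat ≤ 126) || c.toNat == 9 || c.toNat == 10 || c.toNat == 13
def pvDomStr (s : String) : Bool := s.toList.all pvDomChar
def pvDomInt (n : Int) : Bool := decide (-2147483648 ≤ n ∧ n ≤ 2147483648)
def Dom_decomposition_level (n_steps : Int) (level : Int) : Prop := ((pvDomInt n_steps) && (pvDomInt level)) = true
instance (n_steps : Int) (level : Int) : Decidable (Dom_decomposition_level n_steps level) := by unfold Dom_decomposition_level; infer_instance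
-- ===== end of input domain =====

-- B replaces A's trial loop over factors with the closed form n_steps * (2^level // gcd(|n_steps|, 2^level)); intended as faster (timing: A timed out where B returned, no measurable ratio).


-- ===== PORT A =====
-- A's while-loop; fuel is only a totality guard: under Pre_ (0 ≤ level) the loop
-- exits before the fuel (2^level) is spent, because factor = 2^level always succeeds.
def pvALoop (n_steps m : Int) (factor n_new remainder : Int) (fuel : Nat) : Int :=
  match fuel with
  | 0 => n_new
  | fuel' + 1 =>
    if remainder ≠ 0 then
      let factor' := factor + 1
      let n_new' := factor' * n_steps
      pvALoop n_steps m factor' n_new' (PySem.Int.mod n_new' m) fuel'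
    else n_new

def decomposition_level (n_steps : Int) (level : Int) : Int :=
  let m : Int := 2 ^ level.toNat
  pvALoop n_steps m 1 n_steps (PySem.Int.mod n_steps m) m.toNat

-- ===== PORT B =====
-- Source B's Euclidean loop `while b: a, b = b, a % b`; both values stay ≥ 0 here
-- (a starts as abs(n_steps), b as 1 << level), so Nat with Nat.mod is exact.
def pvGcdLoop (a b : Nat) : Nat :=
  if b ≠ 0 then pvGcdLoop b (a % b) else a
termination_by b
decreasing_by exact Nat.mod_lt _ (Nat.pos_of_ne_zero (by assumption))

def decomposition_level_alt (n_steps : Int) (level : Int) : Int :=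
  let block : Int := 2 ^ level.toNat   -- 1 << level
  let g : Int := (pvGcdLoop n_steps.natAbs block.toNat : Nat)
  n_steps * PySem.Int.floordiv block g

-- ===== PRECONDITION & SPEC =====
-- Pre_ excludes negative level, where A's 2**level is a float and `int % float == 0.0`
-- accidentally makes A return n_steps unchanged, while B's integer shift 1 << level raises ValueError.
def Pre_decomposition_level (n_steps : Int) (level : Int) : Prop := 0 ≤ level
instance (n_steps : Int) (level : Int) : Decidable (Pre_decomposition_level n_steps level) := by unfold Pre_decomposition_level; infer_instance
def pvWitness_decomposition_level : Int × Int := (12, 5)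

def Spec_decomposition_level (n_steps : Int) (level : Int) (out : Int) : Prop := out = decomposition_level_alt n_steps level
instance (n_steps : Int) (level : Int) (out : Int) : Decidable (Spec_decomposition_level n_steps level out) := by unfold Spec_decomposition_level; infer_instance

-- ===== CLAIM (what is proved, stated in full; the proofs are below) =====
def Claim_equal_decomposition_level : Prop := ∀ (n_steps : Int) (level : Int), Dom_decomposition_level n_steps level → Pre_decomposition_level n_steps level → Spec_decomposition_level n_steps level (decomposition_level n_steps level)

-- ===== LEMMAS AND PROOFS =====

-- Source B's Euclidean loop computes the gcd (arguments swapped relative to Nat.gcd's recursion)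
theorem pvGcdLoop_eq_gcd (a b : Nat) : pvGcdLoop a b = Nat.gcd b a := by
  rw [pvGcdLoop]
  split
  · rename_i hb
    rw [pvGcdLoop_eq_gcd b (a % b), Nat.gcd_rec b a]
  · rename_i hb
    simp at hb
    simp [hb]
termination_by b
decreasing_by exact Nat.mod_lt _ (Nat.pos_of_ne_zero (by assumption))

-- minimality: any factor f with M ∣ f * N is a multiple of f0 = M / gcd N M
theorem dvd_factor_of_dvd_mul (N M f : Nat) (hM : 0 < M) (h : M ∣ f * N) :
    M / Nat.gcd N M ∣ f := by
  set g := Nat.gcd N M with hg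
  have hgpos : 0 < g := Nat.gcd_pos_of_pos_right _ hM
  obtain ⟨cM, hcM⟩ := Nat.gcd_dvd_right N M
  obtain ⟨cN, hcN⟩ := Nat.gcd_dvd_left N M
  have hMg : M / g = cM := by rw [hcM]; exact Nat.mul_div_cancel_left _ hgpos
  have hNg : N / g = cN := by rw [hcN]; exact Nat.mul_div_cancel_left _ hgpos
  have hcop : Nat.Coprime (M / g) (N / g) := (Nat.coprime_div_gcd_div_gcd hgpos).symm
  have h2 : cM ∣ f * cN := by
    have : g * cM ∣ g * (f * cN) := by
      rw [← hcM]
      have he : f * N = g * (f * cN) := by rw [hcN]; ring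
      exact he ▸ h
    exact (mul_dvd_mul_iff_left hgpos.ne').mp this
  rw [hMg]
  exact Nat.Coprime.dvd_of_dvd_mul_right (hMg ▸ hNg ▸ hcop) (hNg ▸ h2)

-- existence: f0 * N is divisible by M
theorem M_dvd_f0_mul (N M : Nat) (hM : 0 < M) : M ∣ (M / Nat.gcd N M) * N := by
  have hgpos : 0 < Nat.gcd N M := Nat.gcd_pos_of_pos_right _ hM
  obtain ⟨cN, hcN⟩ := Nat.gcd_dvd_left N M
  obtain ⟨cM, hcM⟩ := Nat.gcd_dvd_right N M
  have hMg : M / Nat.gcd N M = cM := Nat.div_eq_of_eq_mul_right hgpos hcM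
  refine ⟨cN, ?_⟩
  rw [hMg]
  calc cM * N = cM * (Nat.gcd N M * cN) := by rw [← hcN]
    _ = (Nat.gcd N M * cM) * cN := by ring
    _ = M * cN := by rw [← hcM]

-- divisibility of f * n by M over Int, in Nat terms (f ≥ 0)
theorem int_dvd_iff_nat (M : Nat) (f n : Int) (hf : 0 ≤ f) :
    (M : Int) ∣ f * n ↔ M ∣ f.toNat * n.natAbs := by
  rw [Int.natCast_dvd, Int.natAbs_mul]
  have : f.natAbs = f.toNat := by omega
  rw [this]

-- main loop lemma: starting at factor f with 1 ≤ f ≤ f0 ≤ f + fuel, A's loop returns f0 * n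
theorem loop_reaches (n : Int) (M : Nat) (hM : 0 < M) :
    ∀ (fuel : Nat) (f : Int), 1 ≤ f → f ≤ ((M / Nat.gcd n.natAbs M : Nat) : Int) →
      ((M / Nat.gcd n.natAbs M : Nat) : Int) ≤ f + fuel →
      pvALoop n M f (f * n) (PySem.Int.mod (f * n) M) fuel =
        ((M / Nat.gcd n.natAbs M : Nat) : Int) * n := by
  intro fuel
  induction fuel with
  | zero =>
    intro f h1 h2 h3
    have : f = ((M / Nat.gcd n.natAbs M : Nat) : Int) := by omega
    simp [pvALoop, this]
  | succ fuel ih =>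
    intro f h1 h2 h3
    rcases eq_or_lt_of_le h2 with heq | hlt
    · -- f = f0 : remainder is 0, loop returns n_new = f0 * n
      have hdvd : (M : Int) ∣ f * n := by
        rw [int_dvd_iff_nat M f n (by omega)]
        have : f.toNat = M / Nat.gcd n.natAbs M := by omega
        rw [this]
        exact M_dvd_f0_mul n.natAbs M hM
      have hz : PySem.Int.mod (f * n) M = 0 := (PySem.Int.mod_eq_zero_iff_dvd _ _).mpr hdvd
      subst heq
      exact (by rw [pvALoop, if_neg (fun hc => hc hz)])
    · -- f < f0 : remainder is nonzero, loop recurses with factor f + 1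
      have hnz : PySem.Int.mod (f * n) M ≠ 0 := by
        intro hz
        have hdvd := (PySem.Int.mod_eq_zero_iff_dvd _ _).mp hz
        rw [int_dvd_iff_nat M f n (by omega)] at hdvd
        have hdvdf : M / Nat.gcd n.natAbs M ∣ f.toNat :=
          dvd_factor_of_dvd_mul n.natAbs M f.toNat hM hdvd
        have hle := Nat.le_of_dvd (by omega) hdvdf
        omega
      show pvALoop n M f (f * n) (PySem.Int.mod (f * n) M) (fuel + 1) = _
      rw [pvALoop]
      simp only [hnz, if_true, ne_eq, not_false_iff]
      have := ih (f + 1) (by omega) (by omega) (by push_cast at h3 ⊢; omega)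
      simpa using this
-- ===== VERDICT (by name: the statement is the Claim_ definition above) =====
theorem decomposition_level_spec : Claim_equal_decomposition_level := by
  intro n l _ hpre
  show decomposition_level n l = decomposition_level_alt n l
  have hcast : (2 : Int) ^ l.toNat = ((2 ^ l.toNat : Nat) : Int) := by push_cast; ring
  set L := l.toNat with hL
  set M : Nat := 2 ^ L with hMdef
  have hM : 0 < M := Nat.two_pow_pos L
  set f0 : Nat := M / Nat.gcd n.natAbs M with hf0
  have hgpos : 0 < Nat.gcd n.natAbs M := Nat.gcd_pos_of_pos_right _ hM
  have hf0pos : 0 < f0 := Nat.div_pos (Nat.le_of_dvd hM (Nat.gcd_dvd_right _ _)) hgpos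
  have hf0le : f0 ≤ M := Nat.div_le_self _ _
  -- the A side: the loop starting at factor 1 returns f0 * n
  have hA : decomposition_level n l = (f0 : Int) * n := by
    unfold decomposition_level
    rw [hcast]
    show pvALoop n (M : Int) 1 n (PySem.Int.mod n (M : Int)) ((M : Int)).toNat = (f0 : Int) * n
    rw [Int.toNat_natCast]
    have := loop_reaches n M hM M 1 (le_refl 1)
      (by exact_mod_cast hf0pos) (by push_cast; omega)
    rw [one_mul] at this
    exact this
  -- the B side: the closed form is n * f0
  have hB : decomposition_level_alt n l = n * (f0 : Int) := by
    unfold decomposition_level_alt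
    rw [hcast]
    show n * PySem.Int.floordiv (M : Int) ((pvGcdLoop n.natAbs ((M : Int)).toNat : Nat) : Int) = n * (f0 : Int)
    rw [Int.toNat_natCast, pvGcdLoop_eq_gcd, PySem.Int.floordiv_natCast, Nat.gcd_comm]
  rw [hA, hB, mul_comm]
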